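-- pv_equiv track=rewrite | github.com/arturogarza356/Codefights | dictionaryKeyValuesAreIndex/dictionaryKeyValuesAreIndex.py | dictionaryKeyValuesAreIndex
-- ===== SOURCE A (Python) =====
-- def dictionaryKeyValuesAreIndex(keys):
--     i = 0
--     dictionary = {}
--     for key in keys:
--         if key not in dictionary:
--             dictionary[key] = [i]
--         else:
--             dictionary[key].append(i)
--         i +=1
--     return dictionary
-- ===== SOURCE B (Python) =====
-- def dictionaryKeyValuesAreIndex(keys):
--     # index-table-first strategy: compute distinct keys in first-appearance
--     # order, then scan the full sequence once per distinct key
--     distinct = list(dict.fromkeys(keys))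
--     return {k: [i for i, x in enumerate(keys) if x == k] for k in distinct}
-- ===== Notes on version B (the rewrite author's own statement) =====
-- stated objective: alternative
-- what changed: Replaces the single accumulating pass that grows per-key lists in a dict with a two-phase strategy: first the distinct keys in first-appearance order (dict.fromkeys), then one full enumerate-scan per distinct key building its index list.
import Mathlib
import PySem

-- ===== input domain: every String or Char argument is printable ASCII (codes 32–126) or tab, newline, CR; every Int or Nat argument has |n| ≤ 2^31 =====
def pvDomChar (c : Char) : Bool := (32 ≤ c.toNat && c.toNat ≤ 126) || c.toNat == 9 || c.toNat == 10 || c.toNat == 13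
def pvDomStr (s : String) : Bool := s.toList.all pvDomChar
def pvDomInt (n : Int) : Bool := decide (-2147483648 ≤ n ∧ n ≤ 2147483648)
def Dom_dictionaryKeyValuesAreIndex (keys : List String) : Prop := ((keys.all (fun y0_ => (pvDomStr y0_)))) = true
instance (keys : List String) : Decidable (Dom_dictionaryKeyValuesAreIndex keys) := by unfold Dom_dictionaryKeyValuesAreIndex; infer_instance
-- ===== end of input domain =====

-- B replaces A's single accumulating dict pass with distinct-keys-first plus one
-- enumerate-scan per distinct key (alternative decomposition, not faster).

-- ===== PORT A =====
-- loop body of A: counter i and the dict are the loop state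
def pvAStep (st : Int × PySem.Dict String (List Int)) (key : String) :
    Int × PySem.Dict String (List Int) :=
  if st.2.contains key = false then (st.1 + 1, st.2.insert key [st.1])
  else (st.1 + 1, st.2.modify key [] (fun l => l ++ [st.1]))

def dictionaryKeyValuesAreIndex (keys : List String) : List (String × List Int) :=
  (keys.foldl pvAStep (0, PySem.Dict.empty)).2.items

-- ===== PORT B =====
-- [i for i, x in enumerate(keys) if x == k]
def pvIndicesOf (keys : List String) (k : String) : List Int :=
  (PySem.List.enumerate keys 0).filterMap (fun p => if p.2 == k then some p.1 else none)

-- distinct = list(dict.fromkeys(keys)); the comprehension {k: … for k in distinct}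
-- has pairwise-distinct keys, so the resulting dict's items are exactly this map
def dictionaryKeyValuesAreIndex_alt (keys : List String) : List (String × List Int) :=
  (PySem.List.dedup keys).map (fun k => (k, pvIndicesOf keys k))

-- ===== PRECONDITION & SPEC =====
def Spec_dictionaryKeyValuesAreIndex (keys : List String) (out : List (String × List Int)) : Prop := out = dictionaryKeyValuesAreIndex_alt keys
instance (keys : List String) (out : List (String × List Int)) : Decidable (Spec_dictionaryKeyValuesAreIndex keys out) := by unfold Spec_dictionaryKeyValuesAreIndex; infer_instance

-- ===== CLAIM (what is proved, stated in full; the proofs are below) =====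
def Claim_equal_dictionaryKeyValuesAreIndex : Prop := ∀ (keys : List String), Dom_dictionaryKeyValuesAreIndex keys → Spec_dictionaryKeyValuesAreIndex keys (dictionaryKeyValuesAreIndex keys)

-- ===== LEMMAS AND PROOFS =====

-- first match in the association list built from distinct keys
lemma pvFind_map_pair (f : String → List Int) (l : List String) (k : String) (h : k ∈ l) :
    (l.map (fun k' => (k', f k'))).find? (fun p => p.1 == k) = some (k, f k) := by
  induction l with
  | nil => cases h
  | cons a l ih =>
    by_cases hak : a = k
    · subst hak; simp
    · have hk : k ∈ l := by cases h with
        | head => exact absurd rfl hak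
        | tail _ h => exact h
      simpa [List.find?, hak] using ih hk

lemma pvAny_map_pair (f : String → List Int) (l : List String) (k : String) :
    (l.map (fun k' => (k', f k'))).any (fun p => p.1 == k) = decide (k ∈ l) := by
  induction l with
  | nil => simp
  | cons a l ih =>
    by_cases hak : a = k
    · subst hak; simp
    · simp [ih, hak, Ne.symm hak]

lemma pvDedup_snoc (keys : List String) (k : String) :
    PySem.List.dedup (keys ++ [k]) =
      if k ∈ keys then PySem.List.dedup keys else PySem.List.dedup keys ++ [k] := by
  have : PySem.List.dedup (keys ++ [k]) = PySem.Set.add (PySem.List.dedup keys) k := by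
    simp [PySem.List.dedup, PySem.Set.ofList, List.foldl_append]
  rw [this, PySem.Set.add]
  by_cases hk : k ∈ keys
  · simp [hk]
  · simp [hk]

lemma pvIndicesOf_snoc (keys : List String) (k k' : String) :
    pvIndicesOf (keys ++ [k]) k' =
      pvIndicesOf keys k' ++ (if k = k' then [(keys.length : Int)] else []) := by
  unfold pvIndicesOf
  rw [PySem.List.enumerate_append, List.filterMap_append]
  congr 1
  by_cases h : k = k' <;> simp [PySem.List.enumerate, h]

lemma pvIndicesOf_of_not_mem (keys : List String) (k : String) (h : k ∉ keys) :
    pvIndicesOf keys k = [] := by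
  unfold pvIndicesOf
  rw [List.filterMap_eq_nil_iff]
  intro p hp
  obtain ⟨j, hj, rfl⟩ := (PySem.List.mem_enumerate_iff _ _ _).1 hp
  have : keys[j] ∈ keys := List.getElem_mem hj
  have hne : keys[j] ≠ k := fun e => h (e ▸ this)
  simp [hne]

-- the loop invariant: after the whole pass, i = length and the dict is B's table
lemma pvFold_eq (keys : List String) :
    keys.foldl pvAStep (0, PySem.Dict.empty) =
      ((keys.length : Int), PySem.Dict.mk (dictionaryKeyValuesAreIndex_alt keys)) := by
  induction keys using List.reverseRecOn with
  | nil => rfl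
  | append_singleton keys k ih =>
    rw [List.foldl_append, ih]
    simp only [List.foldl_cons, List.foldl_nil]
    unfold dictionaryKeyValuesAreIndex_alt
    by_cases hk : k ∈ keys
    · -- key already present: the `else` (append) branch fires
      have hc : (PySem.Dict.mk ((PySem.List.dedup keys).map
          (fun k' => (k', pvIndicesOf keys k')))).contains k = true := by
        simp only [PySem.Dict.contains, pvAny_map_pair]
        simp [hk]
      have hkd : k ∈ PySem.List.dedup keys := (PySem.List.mem_dedup _ _).2 hk
      unfold pvAStep
      split_ifs with hb
      · simp [PySem.Dict.contains] at hb
        exact (hb k hk rfl).elim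
      refine Prod.ext (by simp) ?_
      simp only [PySem.Dict.modify, PySem.Dict.getD, PySem.Dict.get?,
        PySem.Dict.insert, hc, if_true, pvFind_map_pair _ _ _ hkd]
      rw [pvDedup_snoc, if_pos hk]
      congr 1
      rw [List.map_map]
      refine List.map_congr_left ?_
      intro a _
      by_cases hak : a = k
      · subst hak; simp [pvIndicesOf_snoc]
      · simp [pvIndicesOf_snoc, hak, Ne.symm hak]
    · -- new key: the `insert` (append at end) branch fires
      have hc : (PySem.Dict.mk ((PySem.List.dedup keys).map
          (fun k' => (k', pvIndicesOf keys k')))).contains k = false := by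
        simp only [PySem.Dict.contains, pvAny_map_pair]
        simp [hk]
      unfold pvAStep
      split_ifs with hb
      case neg => exact (hb hc).elim
      refine Prod.ext (by simp) ?_
      simp only [PySem.Dict.insert, hc, Bool.false_eq_true, if_false]
      have h1 : (PySem.List.dedup keys).map (fun k' => (k', pvIndicesOf (keys ++ [k]) k')) =
          (PySem.List.dedup keys).map (fun k' => (k', pvIndicesOf keys k')) := by
        refine List.map_congr_left ?_
        intro a ha
        have hak : ¬ (k = a) := fun e => by
          subst e; exact hk ((PySem.List.mem_dedup _ _).1 ha)
        simp [pvIndicesOf_snoc, hak]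
      rw [pvDedup_snoc, if_neg hk, List.map_append, h1]
      simp [pvIndicesOf_snoc, pvIndicesOf_of_not_mem keys k hk]

-- ===== VERDICT (by name: the statement is the Claim_ definition above) =====
theorem dictionaryKeyValuesAreIndex_spec : Claim_equal_dictionaryKeyValuesAreIndex := by
  intro keys _
  unfold Spec_dictionaryKeyValuesAreIndex dictionaryKeyValuesAreIndex
  rw [pvFold_eq]
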